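-- pv_equiv track=rewrite | github.com/wjdqlsdlsp/coding_test_practice | programers_heap/03_heap.py | solution
-- ===== SOURCE A (Python) =====
-- import heapq
--
-- def solution(operations):
--     large_heap = []
--     small_heap = []
--     count = 0
--     for operate in operations:
--         if count == 0:
--             large_heap = []
--             small_heap = []
--         split = operate.split(" ")
--         if split[0] =='I':
--             num = int(split[1])
--             heapq.heappush(large_heap, -1* num)
--             heapq.heappush(small_heap, num)
--             count +=1
--         else:
--             if count ==0:
--                 continue
--             if split[1] =='1':
--                 heapq.heappop(large_heap)
--                 count -=1
--             else:
--                 heapq.heappop(small_heap)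
--                 count -=1
--     if count ==0:
--         answer = [0,0]
--     else:
--         answer = [heapq.heappop(large_heap)*-1,heapq.heappop(small_heap)]
--
--     return answer
-- ===== SOURCE B (Python) =====
-- def _insort(xs, v):
--     # new ascending list with v inserted (after equal elements)
--     return [x for x in xs if x <= v] + [v] + [x for x in xs if x > v]
--
-- def solution(operations):
--     large = []  # ascending; its max is the answer's first component
--     small = []  # ascending; its min is the answer's second component
--     count = 0
--     for op in operations:
--         if count == 0:
--             large = []
--             small = []
--         parts = op.split(" ")
--         if parts[0] == 'I':
--             num = int(parts[1])
--             large = _insort(large, num)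
--             small = _insort(small, num)
--             count += 1
--         elif count != 0:
--             if parts[1] == '1':
--                 large = large[:-1]
--             else:
--                 small = small[1:]
--             count -= 1
--     return [0, 0] if count == 0 else [large[-1], small[0]]
-- ===== Notes on version B (the rewrite author's own statement) =====
-- stated objective: simpler
-- what changed: Replaces the two binary heaps (heapq push/pop) by two plain ascending sorted lists: insertion keeps each list ordered via a partition around the new value, delete-max drops the last element of the large list, delete-min drops the first element of the small list, and the final answer is read directly off the ends of the lists.
import Mathlib
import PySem

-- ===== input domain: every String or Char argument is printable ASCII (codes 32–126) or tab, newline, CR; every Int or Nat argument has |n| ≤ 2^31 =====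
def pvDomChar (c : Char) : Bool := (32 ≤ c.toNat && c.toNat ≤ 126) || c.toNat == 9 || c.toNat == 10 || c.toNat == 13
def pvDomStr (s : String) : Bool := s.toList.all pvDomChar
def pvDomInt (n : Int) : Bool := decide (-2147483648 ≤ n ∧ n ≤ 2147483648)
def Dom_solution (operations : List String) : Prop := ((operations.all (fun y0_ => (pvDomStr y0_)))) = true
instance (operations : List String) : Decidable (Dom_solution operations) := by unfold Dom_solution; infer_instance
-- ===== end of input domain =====

-- B replaces A's two binary heaps by two ascending sorted lists with direct max/min access (objective: simpler/idiomatic; not claimed faster).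

-- ===== PORT A =====
-- A uses heapq (a binary min-heap); PySem has no heapq, so the heap is ported by hand as a
-- skew-heap priority queue: push/pop produce the same popped VALUES as heapq's array heap
-- (pop returns the minimum), which is all A's result depends on.
inductive SkewHeap where
  | nil : SkewHeap
  | node : Int → SkewHeap → SkewHeap → SkewHeap
deriving DecidableEq, Repr

def SkewHeap.size : SkewHeap → Nat
  | .nil => 0
  | .node _ l r => l.size + r.size + 1

-- skew-heap merge, structurally recursive on a fuel bounded by the total size
def SkewHeap.mergeF : Nat → SkewHeap → SkewHeap → SkewHeap
  | _, .nil, b => b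
  | _, a, .nil => a
  | 0, a, _ => a                       -- fuel never runs out: merge supplies size a + size b
  | fuel+1, .node x l r, .node y l' r' =>
    if x ≤ y then .node x (SkewHeap.mergeF fuel r (.node y l' r')) l
    else .node y (SkewHeap.mergeF fuel r' (.node x l r)) l'

def SkewHeap.merge (a b : SkewHeap) : SkewHeap := SkewHeap.mergeF (a.size + b.size) a b

-- heapq.heappush
def SkewHeap.push (h : SkewHeap) (v : Int) : SkewHeap := h.merge (.node v .nil .nil)

-- heapq.heappop: (min, rest); the .nil default is never reached in A (A pops only non-empty heaps)
def SkewHeap.pop : SkewHeap → Int × SkewHeap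
  | .nil => (0, .nil)
  | .node v l r => (v, l.merge r)

-- the body of A's for-loop: clear-on-count==0, then dispatch on the operation
def pvClearA : SkewHeap × SkewHeap × Int → SkewHeap × SkewHeap × Int
  | (large, small, count) => if count = 0 then (.nil, .nil, count) else (large, small, count)

def pvCoreA : SkewHeap × SkewHeap × Int → String → SkewHeap × SkewHeap × Int
  | (large, small, count), operate =>
    let split := (PySem.Str.split? operate " ").getD []   -- operate.split(" "); sep ≠ "" so never none
    if PySem.List.pyGetD split 0 "" = "I" then
      match PySem.List.pyGet? split 1 with
      | none => (large, small, count)                     -- IndexError; excluded by Pre_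
      | some s =>
        match PySem.Int.ofStr? s with
        | none => (large, small, count)                   -- ValueError; excluded by Pre_
        | some num => (large.push (-1 * num), small.push num, count + 1)
    else if count = 0 then (large, small, count)          -- continue
    else
      match PySem.List.pyGet? split 1 with
      | none => (large, small, count)                     -- IndexError; excluded by Pre_
      | some s =>
        if s = "1" then ((large.pop).2, small, count - 1)
        else (large, (small.pop).2, count - 1)

def pvStepA (st : SkewHeap × SkewHeap × Int) (operate : String) : SkewHeap × SkewHeap × Int :=
  pvCoreA (pvClearA st) operate

def solution (operations : List String) : List Int :=
  match operations.foldl pvStepA (.nil, .nil, 0) with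
  | (large, small, count) =>
    if count = 0 then [0, 0]
    else [(large.pop).1 * -1, (small.pop).1]

-- ===== PORT B =====
-- B keeps each track as an ascending sorted list: insert = _insort (two comprehensions),
-- delete-max = large[:-1], delete-min = small[1:], answer = [large[-1], small[0]].
def pvInsort (xs : List Int) (v : Int) : List Int :=
  xs.filter (fun x => decide (x ≤ v)) ++ v :: xs.filter (fun x => decide (v < x))

def pvClearB : List Int × List Int × Int → List Int × List Int × Int
  | (large, small, count) => if count = 0 then ([], [], count) else (large, small, count)

def pvCoreB : List Int × List Int × Int → String → List Int × List Int × Int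
  | (large, small, count), op =>
    let parts := (PySem.Str.split? op " ").getD []        -- op.split(" ")
    if PySem.List.pyGetD parts 0 "" = "I" then
      match PySem.List.pyGet? parts 1 with
      | none => (large, small, count)                     -- IndexError; excluded by Pre_
      | some s =>
        match PySem.Int.ofStr? s with
        | none => (large, small, count)                   -- ValueError; excluded by Pre_
        | some num => (pvInsort large num, pvInsort small num, count + 1)
    else if count ≠ 0 then
      match PySem.List.pyGet? parts 1 with
      | none => (large, small, count)                     -- IndexError; excluded by Pre_
      | some s =>
        if s = "1" then (PySem.List.slice large none (some (-1)), small, count - 1)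
        else (large, PySem.List.slice small (some 1) none, count - 1)
    else (large, small, count)

def pvStepB (st : List Int × List Int × Int) (op : String) : List Int × List Int × Int :=
  pvCoreB (pvClearB st) op

def solution_alt (operations : List String) : List Int :=
  match operations.foldl pvStepB ([], [], 0) with
  | (large, small, count) =>
    if count = 0 then [0, 0]
    else [(PySem.List.pyGet? large (-1)).getD 0, (PySem.List.pyGet? small 0).getD 0]

-- ===== PRECONDITION & SPEC =====
def pvTok (op : String) : List String := (PySem.Str.split? op " ").getD []

-- pvOk c ops = "starting from element count c, A raises no exception on ops": an 'I' op must
-- carry a second token that int() accepts; a delete op met with positive count must carry its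
-- second token; a delete op met with count 0 is skipped by A (continue) and needs no argument.
def pvOk : Int → List String → Bool
  | _, [] => true
  | c, op :: rest =>
    if PySem.List.pyGetD (pvTok op) 0 "" = "I" then
      decide (2 ≤ (pvTok op).length) && (PySem.Int.ofStr? ((pvTok op).getD 1 "")).isSome
        && pvOk (c + 1) rest
    else if c = 0 then pvOk c rest
    else decide (2 ≤ (pvTok op).length) && pvOk (c - 1) rest

-- Pre_ excludes EXACTLY the inputs on which A raises (IndexError on a missing second token,
-- ValueError on a non-integer 'I' argument): pvOk walks the operation list with the running
-- element count — a function of the input alone — so deletes that A skips at count 0 need no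
-- argument and stay inside Pre_.  No input on which A returns is excluded.
def Pre_solution (operations : List String) : Prop := pvOk 0 operations = true
instance (operations : List String) : Decidable (Pre_solution operations) := by
  unfold Pre_solution; infer_instance

def pvWitness_solution : List String := ["I 5", "I -2", "D 1"]

def Spec_solution (operations : List String) (out : List Int) : Prop := out = solution_alt operations
instance (operations : List String) (out : List Int) : Decidable (Spec_solution operations out) := by unfold Spec_solution; infer_instance

-- ===== CLAIM (what is proved, stated in full; the proofs are below) =====
def Claim_equal_solution : Prop := ∀ (operations : List String), Dom_solution operations → Pre_solution operations → Spec_solution operations (solution operations)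

-- ===== LEMMAS AND PROOFS =====

def SkewHeap.toL : SkewHeap → List Int
  | .nil => []
  | .node v l r => v :: (l.toL ++ r.toL)

def SkewHeap.HO : SkewHeap → Prop
  | .nil => True
  | .node v l r => (∀ x ∈ l.toL, v ≤ x) ∧ (∀ x ∈ r.toL, v ≤ x) ∧ l.HO ∧ r.HO

lemma mset_mergeF : ∀ (fuel : Nat) (a b : SkewHeap), a.size + b.size ≤ fuel →
    ((SkewHeap.mergeF fuel a b).toL : Multiset Int) = ↑a.toL + ↑b.toL := by
  intro fuel
  induction fuel with
  | zero =>
    intro a b h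
    cases a with
    | nil => simp [SkewHeap.mergeF, SkewHeap.toL]
    | node x l r =>
      cases b with
      | nil => simp [SkewHeap.mergeF, SkewHeap.toL]
      | node y l' r' => exfalso; simp [SkewHeap.size] at h
  | succ n ih =>
    intro a b h
    cases a with
    | nil => simp [SkewHeap.mergeF, SkewHeap.toL]
    | node x l r =>
      cases b with
      | nil => simp [SkewHeap.mergeF, SkewHeap.toL]
      | node y l' r' =>
        have hsz1 : r.size + (SkewHeap.node y l' r').size ≤ n := by
          simp [SkewHeap.size] at h ⊢; omega
        have hsz2 : r'.size + (SkewHeap.node x l r).size ≤ n := by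
          simp [SkewHeap.size] at h ⊢; omega
        simp only [SkewHeap.mergeF]
        split_ifs with hxy
        · simp only [SkewHeap.toL, ← Multiset.cons_coe, ← Multiset.coe_add, ih _ _ hsz1]
          simp only [← Multiset.singleton_add]
          abel
        · simp only [SkewHeap.toL, ← Multiset.cons_coe, ← Multiset.coe_add, ih _ _ hsz2]
          simp only [← Multiset.singleton_add]
          abel

lemma toL_mergeF (n : Nat) (a b : SkewHeap) (h : a.size + b.size ≤ n) :
    (SkewHeap.mergeF n a b).toL.Perm (a.toL ++ b.toL) :=
  Multiset.coe_eq_coe.mp (by rw [mset_mergeF n a b h]; simp)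

lemma toL_merge (a b : SkewHeap) : (a.merge b).toL.Perm (a.toL ++ b.toL) :=
  toL_mergeF _ a b le_rfl

lemma HO_root_le {v : Int} {l r : SkewHeap} (h : (SkewHeap.node v l r).HO) :
    ∀ x ∈ (SkewHeap.node v l r).toL, v ≤ x := by
  obtain ⟨h1, h2, _, _⟩ := h
  simp only [SkewHeap.toL, List.mem_cons, List.mem_append]
  rintro x (rfl | hx | hx)
  · exact le_refl x
  · exact h1 x hx
  · exact h2 x hx

lemma HO_mergeF : ∀ (fuel : Nat) (a b : SkewHeap), a.size + b.size ≤ fuel →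
    a.HO → b.HO → (SkewHeap.mergeF fuel a b).HO := by
  intro fuel
  induction fuel with
  | zero =>
    intro a b h ha hb
    cases a with
    | nil => simpa [SkewHeap.mergeF] using hb
    | node x l r =>
      cases b with
      | nil => simpa [SkewHeap.mergeF] using ha
      | node y l' r' => exfalso; simp [SkewHeap.size] at h
  | succ n ih =>
    intro a b h ha hb
    cases a with
    | nil => simpa [SkewHeap.mergeF] using hb
    | node x l r =>
      cases b with
      | nil => simpa [SkewHeap.mergeF] using ha
      | node y l' r' =>
        have hsz1 : r.size + (SkewHeap.node y l' r').size ≤ n := by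
          simp [SkewHeap.size] at h ⊢; omega
        have hsz2 : r'.size + (SkewHeap.node x l r).size ≤ n := by
          simp [SkewHeap.size] at h ⊢; omega
        obtain ⟨hal, har, hHl, hHr⟩ := ha
        obtain ⟨hbl, hbr, hHl2, hHr2⟩ := hb
        simp only [SkewHeap.mergeF]
        split_ifs with hxy
        · refine ⟨?_, hal, ih _ _ hsz1 hHr ⟨hbl, hbr, hHl2, hHr2⟩, hHl⟩
          intro z hz
          rcases List.mem_append.mp ((toL_mergeF n _ _ hsz1).mem_iff.mp hz) with hm | hm
          · exact har z hm
          · exact le_trans hxy (HO_root_le ⟨hbl, hbr, hHl2, hHr2⟩ z hm)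
        · refine ⟨?_, hbl, ih _ _ hsz2 hHr2 ⟨hal, har, hHl, hHr⟩, hHl2⟩
          intro z hz
          rcases List.mem_append.mp ((toL_mergeF n _ _ hsz2).mem_iff.mp hz) with hm | hm
          · exact hbr z hm
          · exact le_trans (le_of_not_ge hxy) (HO_root_le ⟨hal, har, hHl, hHr⟩ z hm)

lemma HO_merge (a b : SkewHeap) (ha : a.HO) (hb : b.HO) : (a.merge b).HO :=
  HO_mergeF _ a b le_rfl ha hb

-- the coupling invariant between A's state and B's state
def pvInv : SkewHeap × SkewHeap × Int → List Int × List Int × Int → Prop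
  | (hl, hs, ca), (ll, ls, cb) =>
    ca = cb ∧ 0 ≤ ca ∧
    hl.toL.Perm (ll.map (fun x => -x)) ∧ hs.toL.Perm ls ∧
    hl.HO ∧ hs.HO ∧
    List.Pairwise (· ≤ ·) ll ∧ List.Pairwise (· ≤ ·) ls ∧
    ca.toNat ≤ ll.length ∧ ca.toNat ≤ ls.length

-- clearing both states preserves the invariant and the count, with named cleared components
lemma clear_inv' {hl hs : SkewHeap} {ll ls : List Int} {c : Int}
    (h : pvInv (hl, hs, c) (ll, ls, c)) :
    ∃ hl' hs' ll' ls', pvClearA (hl, hs, c) = (hl', hs', c) ∧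
      pvClearB (ll, ls, c) = (ll', ls', c) ∧ pvInv (hl', hs', c) (ll', ls', c) := by
  by_cases hz : c = 0
  · refine ⟨.nil, .nil, [], [], by simp [pvClearA, hz], by simp [pvClearB, hz], ?_⟩
    exact ⟨rfl, by omega, by simp [SkewHeap.toL], by simp [SkewHeap.toL], trivial, trivial,
      List.Pairwise.nil, List.Pairwise.nil, by simp [hz], by simp [hz]⟩
  · exact ⟨hl, hs, ll, ls, by simp [pvClearA, hz], by simp [pvClearB, hz], h⟩

lemma perm_insort (xs : List Int) (v : Int) : (pvInsort xs v).Perm (v :: xs) := by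
  unfold pvInsort
  have hf : xs.filter (fun x => decide (v < x)) = xs.filter (fun x => ! decide (x ≤ v)) :=
    List.filter_congr (fun x _ => by by_cases h : x ≤ v <;> simp [h, not_lt.mpr, lt_of_not_ge])
  rw [hf]
  exact List.perm_middle.trans ((List.filter_append_perm _ xs).cons v)

lemma length_insort (xs : List Int) (v : Int) : (pvInsort xs v).length = xs.length + 1 := by
  simpa using (perm_insort xs v).length_eq

lemma sorted_insort {xs : List Int} {v : Int} (h : List.Pairwise (· ≤ ·) xs) :
    List.Pairwise (· ≤ ·) (pvInsort xs v) := by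
  unfold pvInsort
  rw [List.pairwise_append]
  refine ⟨List.Pairwise.filter _ h, ?_, ?_⟩
  · rw [List.pairwise_cons]
    exact ⟨fun b hb => le_of_lt (by simpa using (List.mem_filter.mp hb).2),
      List.Pairwise.filter _ h⟩
  · intro a ha b hb
    have ha' : a ≤ v := by simpa using (List.mem_filter.mp ha).2
    rcases List.mem_cons.mp hb with rfl | hb'
    · exact ha'
    · exact ha'.trans (le_of_lt (by simpa using (List.mem_filter.mp hb').2))

lemma sorted_le_getLast {x : Int} : ∀ {ll : List Int}, List.Pairwise (· ≤ ·) ll → x ∈ ll →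
    ∀ hne : ll ≠ [], x ≤ ll.getLast hne := by
  intro ll
  induction ll with
  | nil => simp
  | cons a t ih =>
    intro h hx hne
    cases t with
    | nil => simp at hx; simp [hx, List.getLast]
    | cons b t2 =>
      rw [List.getLast_cons (by simp)]
      rcases List.mem_cons.mp hx with rfl | hx'
      · exact (List.pairwise_cons.mp h).1 _ (List.getLast_mem _)
      · exact ih (List.pairwise_cons.mp h).2 hx' _

lemma sorted_head_le {x hd : Int} {tl : List Int} (h : List.Pairwise (· ≤ ·) (hd :: tl))
    (hx : x ∈ hd :: tl) : hd ≤ x := by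
  rcases List.mem_cons.mp hx with rfl | hx'
  · exact le_refl x
  · exact (List.pairwise_cons.mp h).1 x hx'

lemma root_eq {v : Int} {l r : SkewHeap} {ys : List Int} (hHO : (SkewHeap.node v l r).HO)
    (hperm : (SkewHeap.node v l r).toL.Perm ys) {m : Int} (hm : m ∈ ys)
    (hmin : ∀ x ∈ ys, m ≤ x) : v = m :=
  le_antisymm (HO_root_le hHO m (hperm.mem_iff.mpr hm))
    (hmin v (hperm.mem_iff.mp (by simp [SkewHeap.toL])))

lemma pyGet?_neg_one {ll : List Int} (h : ll ≠ []) :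
    PySem.List.pyGet? ll (-1) = some (ll.getLast h) := by
  have hl : 0 < ll.length := List.length_pos_iff.mpr h
  have h1 : 1 ≤ ll.length := hl
  simp [PySem.List.pyGet?, PySem.List.pyIdx?, h1, List.getLast_eq_getElem,
    List.getElem?_eq_getElem (show ll.length - 1 < ll.length by omega)]

lemma pyGet?_zero (ls : List Int) : PySem.List.pyGet? ls 0 = ls[0]? := by
  rcases ls with _ | ⟨a, t⟩ <;> simp [PySem.List.pyGet?, PySem.List.pyIdx?]

lemma get1 {ts : List String} (h : 2 ≤ ts.length) :
    PySem.List.pyGet? ts 1 = some (ts.getD 1 "") := by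
  have h1 : (1 : Int) = ((1 : Nat) : Int) := rfl
  rw [h1, PySem.List.pyGet?_natCast, List.getD_eq_getElem?_getD,
    List.getElem?_eq_getElem (by omega)]
  rfl

-- one loop iteration preserves the invariant and threads pvOk's running count
lemma step_inv (op : String) (rest : List String)
    {a : SkewHeap × SkewHeap × Int} {b : List Int × List Int × Int}
    (h : pvInv a b) (hok : pvOk a.2.2 (op :: rest) = true) :
    pvInv (pvStepA a op) (pvStepB b op) ∧ pvOk (pvStepA a op).2.2 rest = true := by
  obtain ⟨hl, hs, ca⟩ := a
  obtain ⟨ll, ls, cb⟩ := b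
  have hc : ca = cb := h.1
  subst hc
  obtain ⟨hl', hs', ll', ls', hAeq, hBeq, hinv'⟩ := clear_inv' h
  obtain ⟨-, h0, hpl, hps, hHl, hHs, hsl, hss, hcl, hcs⟩ := hinv'
  simp only at hok
  unfold pvStepA pvStepB
  rw [hAeq, hBeq]
  have heq : (PySem.Str.split? op " ").getD ([] : List String) = pvTok op := rfl
  by_cases hIop : PySem.List.pyGetD (pvTok op) 0 "" = "I"
  · rw [pvOk, if_pos hIop] at hok
    simp only [Bool.and_eq_true, decide_eq_true_eq] at hok
    obtain ⟨⟨hlen, hparse⟩, hrest⟩ := hok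
    obtain ⟨num, hnum⟩ := Option.isSome_iff_exists.mp hparse
    have hAc : pvCoreA (hl', hs', ca) op
        = (hl'.push (-1 * num), hs'.push num, ca + 1) := by
      simp only [pvCoreA, heq, if_pos hIop, get1 hlen, hnum]
    have hBc : pvCoreB (ll', ls', ca) op
        = (pvInsort ll' num, pvInsort ls' num, ca + 1) := by
      simp only [pvCoreB, heq, if_pos hIop, get1 hlen, hnum]
    rw [hAc, hBc]
    refine ⟨⟨rfl, by omega, ?_, ?_, ?_, ?_, sorted_insort hsl, sorted_insort hss, ?_, ?_⟩,
      hrest⟩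
    · refine (toL_merge hl' _).trans ?_
      have h3 : (SkewHeap.node (-1 * num) .nil .nil).toL = [-num] := by
        simp [SkewHeap.toL]
      rw [h3]
      refine ((hpl.append_right _).trans (List.perm_append_singleton _ _)).trans ?_
      simpa using ((perm_insort ll' num).map (fun x => -x)).symm
    · refine (toL_merge hs' _).trans ?_
      have h3 : (SkewHeap.node num .nil .nil).toL = [num] := by simp [SkewHeap.toL]
      rw [h3]
      exact ((hps.append_right _).trans (List.perm_append_singleton _ _)).trans
        (perm_insort ls' num).symm
    · exact HO_merge _ _ hHl ⟨by simp [SkewHeap.toL], by simp [SkewHeap.toL], trivial, trivial⟩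
    · exact HO_merge _ _ hHs ⟨by simp [SkewHeap.toL], by simp [SkewHeap.toL], trivial, trivial⟩
    · rw [length_insort]; omega
    · rw [length_insort]; omega
  · by_cases hz : ca = 0
    · rw [pvOk, if_neg hIop, if_pos hz] at hok
      have hAc : pvCoreA (hl', hs', ca) op = (hl', hs', ca) := by
        simp only [pvCoreA, heq, if_neg hIop, if_pos hz]
      have hBc : pvCoreB (ll', ls', ca) op = (ll', ls', ca) := by
        simp only [pvCoreB, heq, if_neg hIop, ne_eq, hz, not_true_eq_false, if_false]
      rw [hAc, hBc]
      exact ⟨⟨rfl, h0, hpl, hps, hHl, hHs, hsl, hss, hcl, hcs⟩, hok⟩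
    · rw [pvOk, if_neg hIop, if_neg hz] at hok
      simp only [Bool.and_eq_true, decide_eq_true_eq] at hok
      obtain ⟨hlen, hrest⟩ := hok
      have hca1 : 1 ≤ ca.toNat := by omega
      by_cases hs1 : (pvTok op).getD 1 "" = "1"
      · have hAc : pvCoreA (hl', hs', ca) op = ((hl'.pop).2, hs', ca - 1) := by
          simp only [pvCoreA, heq, if_neg hIop, if_neg hz, get1 hlen, if_pos hs1]
        have hBc : pvCoreB (ll', ls', ca) op
            = (PySem.List.slice ll' none (some (-1)), ls', ca - 1) := by
          simp only [pvCoreB, heq, if_neg hIop, ne_eq, hz, not_false_eq_true, if_true,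
            get1 hlen, if_pos hs1]
        rw [hAc, hBc]
        have hll : ll' ≠ [] := by
          intro hnil; rw [hnil] at hcl; simp at hcl; omega
        cases hl' with
        | nil =>
          exfalso
          have := hpl.length_eq
          simp [SkewHeap.toL] at this
          exact hll (List.eq_nil_of_length_eq_zero this.symm)
        | node v l r =>
          obtain ⟨hvl, hvr, hol, hor⟩ := hHl
          simp only [SkewHeap.toL] at hpl
          have hv : v = -(ll'.getLast hll) := by
            refine root_eq ⟨hvl, hvr, hol, hor⟩ hpl ?_ ?_
            · exact List.mem_map.mpr ⟨_, List.getLast_mem hll, rfl⟩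
            · intro x hx
              obtain ⟨y, hy, rfl⟩ := List.mem_map.mp hx
              exact neg_le_neg (sorted_le_getLast hsl hy hll)
          have hmapeq : ll'.map (fun x => -x) = (ll'.dropLast).map (fun x => -x) ++ [v] := by
            conv_lhs => rw [← List.dropLast_append_getLast hll]
            rw [List.map_append, hv]
            rfl
          have hperm2 : (l.toL ++ r.toL).Perm ((ll'.dropLast).map (fun x => -x)) := by
            refine List.Perm.cons_inv (a := v) ?_
            refine hpl.trans ?_
            rw [hmapeq]
            exact List.perm_append_singleton _ _
          refine ⟨⟨rfl, by omega, ?_, hps, ?_, hHs, ?_, hss, ?_, ?_⟩, hrest⟩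
          · simp only [SkewHeap.pop, PySem.List.slice_to_neg_one]
            exact (toL_merge l r).trans hperm2
          · exact HO_merge _ _ hol hor
          · rw [PySem.List.slice_to_neg_one]
            exact List.Pairwise.sublist (List.dropLast_sublist ll') hsl
          · rw [PySem.List.slice_to_neg_one, List.length_dropLast]; omega
          · omega
      · have hAc : pvCoreA (hl', hs', ca) op = (hl', (hs'.pop).2, ca - 1) := by
          simp only [pvCoreA, heq, if_neg hIop, if_neg hz, get1 hlen, if_neg hs1]
        have hBc : pvCoreB (ll', ls', ca) op
            = (ll', PySem.List.slice ls' (some 1) none, ca - 1) := by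
          simp only [pvCoreB, heq, if_neg hIop, ne_eq, hz, not_false_eq_true, if_true,
            get1 hlen, if_neg hs1]
        rw [hAc, hBc]
        have hls : ls' ≠ [] := by
          intro hnil; rw [hnil] at hcs; simp at hcs; omega
        obtain ⟨hd, tl, rfl⟩ := List.exists_cons_of_ne_nil hls
        cases hs' with
        | nil =>
          exfalso
          have := hps.length_eq
          simp [SkewHeap.toL] at this
        | node w l r =>
          obtain ⟨hwl, hwr, hol, hor⟩ := hHs
          simp only [SkewHeap.toL] at hps
          have hw : w = hd := by
            refine root_eq ⟨hwl, hwr, hol, hor⟩ hps (by simp) ?_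
            intro x hx
            exact sorted_head_le hss hx
          have hps' : (hd :: (l.toL ++ r.toL)).Perm (hd :: tl) := by
            have h4 := hps; rw [hw] at h4; exact h4
          have hperm2 : (l.toL ++ r.toL).Perm tl := hps'.cons_inv
          have hslice : PySem.List.slice (hd :: tl) (some 1) none = tl := by
            rw [PySem.List.slice_from _ (by norm_num)]
            rfl
          refine ⟨⟨rfl, by omega, hpl, ?_, hHl, ?_, hsl, ?_, ?_, ?_⟩, hrest⟩
          · simp only [SkewHeap.pop, hslice]
            exact (toL_merge l r).trans hperm2
          · exact HO_merge _ _ hol hor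
          · rw [hslice]
            exact (List.pairwise_cons.mp hss).2
          · omega
          · rw [hslice]
            simp at hcs
            omega

lemma fold_inv : ∀ (ops : List String) (a : SkewHeap × SkewHeap × Int)
    (b : List Int × List Int × Int), pvInv a b → pvOk a.2.2 ops = true →
    pvInv (ops.foldl pvStepA a) (ops.foldl pvStepB b) := by
  intro ops
  induction ops with
  | nil => intro a b h _; exact h
  | cons op rest ih =>
    intro a b h hok
    obtain ⟨h1, h2⟩ := step_inv op rest h hok
    simpa using ih _ _ h1 h2

lemma final_eq {a : SkewHeap × SkewHeap × Int} {b : List Int × List Int × Int} (h : pvInv a b) :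
    (match a with
     | (large, small, count) =>
       if count = 0 then [0, 0] else [(large.pop).1 * -1, (small.pop).1])
    = (match b with
       | (large, small, count) =>
         if count = 0 then ([0, 0] : List Int)
         else [(PySem.List.pyGet? large (-1)).getD 0, (PySem.List.pyGet? small 0).getD 0]) := by
  obtain ⟨hl, hs, ca⟩ := a
  obtain ⟨ll, ls, cb⟩ := b
  obtain ⟨hc, h0, hpl, hps, hHl, hHs, hsl, hss, hcl, hcs⟩ := h
  subst hc
  by_cases hz : ca = 0
  · simp [hz]
  · simp only [if_neg hz]
    have hca1 : 1 ≤ ca.toNat := by omega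
    have hll : ll ≠ [] := by intro hnil; rw [hnil] at hcl; simp at hcl; omega
    have hls : ls ≠ [] := by intro hnil; rw [hnil] at hcs; simp at hcs; omega
    cases hl with
    | nil =>
      exfalso
      have := hpl.length_eq
      simp [SkewHeap.toL] at this
      exact hll (List.eq_nil_of_length_eq_zero this.symm)
    | node v l r =>
      cases hs with
      | nil =>
        exfalso
        have := hps.length_eq
        simp [SkewHeap.toL] at this
        exact hls (List.eq_nil_of_length_eq_zero this.symm)
      | node w l2 r2 =>
        have hv : v = -(ll.getLast hll) := by
          refine root_eq hHl hpl ?_ ?_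
          · exact List.mem_map.mpr ⟨_, List.getLast_mem hll, rfl⟩
          · intro x hx
            obtain ⟨y, hy, rfl⟩ := List.mem_map.mp hx
            exact neg_le_neg (sorted_le_getLast hsl hy hll)
        obtain ⟨hd, tl, rfl⟩ := List.exists_cons_of_ne_nil hls
        have hw : w = hd := root_eq hHs hps (by simp) (fun x hx => sorted_head_le hss hx)
        simp only [SkewHeap.pop, pyGet?_neg_one hll, pyGet?_zero, Option.getD_some,
          List.getElem?_cons_zero, hv, hw]
        norm_num

-- ===== VERDICT (by name: the statement is the Claim_ definition above) =====
theorem solution_spec : Claim_equal_solution := by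
  intro ops _hdom hpre
  unfold Spec_solution solution solution_alt
  refine final_eq (fold_inv ops (.nil, .nil, 0) ([], [], 0) ?_ hpre)
  exact ⟨rfl, le_refl 0, by simp [SkewHeap.toL], by simp [SkewHeap.toL], trivial, trivial,
    List.Pairwise.nil, List.Pairwise.nil, by simp, by simp⟩
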